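-- pv_equiv track=rewrite | github.com/hey621/ai-trader | trade.py | update_active_positions
-- ===== SOURCE A (Python) =====
-- def update_active_positions(md: str, new_rows: list[str]) -> str:
--     lines = md.splitlines()
--     result = []
--     in_section = False
--     table_started = False
--     inserted = False
--
--     for line in lines:
--         if "## ACTIVE POSITIONS" in line:
--             in_section = True
--             result.append(line)
--             continue
--         if in_section and not inserted:
--             if line.startswith("|") and "---" not in line and "Ticker" not in line:
--                 table_started = True
--             if table_started and not line.startswith("|"):
--                 for row in new_rows:
--                     result.append(row)
--                 inserted = True
--             if in_section and line.startswith("##") and not line.startswith("## ACTIVE"):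
--                 if not inserted:
--                     for row in new_rows:
--                         result.append(row)
--                     inserted = True
--                 in_section = False
--         result.append(line)
--
--     if not inserted:
--         for row in new_rows:
--             result.append(row)
--
--     return "\n".join(result)
-- ===== SOURCE B (Python) =====
-- def update_active_positions(md: str, new_rows: list[str]) -> str:
--     lines = md.splitlines()
--     idx = len(lines)
--     in_section = False
--     table_started = False
--     for i, line in enumerate(lines):
--         if "## ACTIVE POSITIONS" in line:
--             in_section = True
--             continue
--         if in_section:
--             if line.startswith("|") and "---" not in line and "Ticker" not in line:
--                 table_started = True
--             if (table_started and not line.startswith("|")) or (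
--                 line.startswith("##") and not line.startswith("## ACTIVE")
--             ):
--                 idx = i
--                 break
--     return "\n".join(lines[:idx] + new_rows + lines[idx:])
-- ===== Notes on version B (the rewrite author's own statement) =====
-- stated objective: simpler
-- what changed: B replaces A's accumulator loop that threads result/in_section/table_started/inserted state (with duplicated row-appending in two branches and a post-loop fallback) by a single locate-then-splice: one scan computes the unique insertion index (defaulting to the end), and the result is lines[:idx] + new_rows + lines[idx:].
import Mathlib
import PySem

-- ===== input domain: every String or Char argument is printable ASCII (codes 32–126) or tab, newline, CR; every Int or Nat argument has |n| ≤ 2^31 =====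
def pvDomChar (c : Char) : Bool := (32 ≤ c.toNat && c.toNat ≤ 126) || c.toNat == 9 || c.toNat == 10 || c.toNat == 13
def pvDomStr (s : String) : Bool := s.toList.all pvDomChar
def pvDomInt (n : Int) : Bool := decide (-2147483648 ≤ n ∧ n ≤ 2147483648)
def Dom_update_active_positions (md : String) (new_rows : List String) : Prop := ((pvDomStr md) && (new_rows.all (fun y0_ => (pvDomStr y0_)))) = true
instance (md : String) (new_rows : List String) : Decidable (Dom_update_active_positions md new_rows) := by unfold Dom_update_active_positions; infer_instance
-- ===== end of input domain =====

-- B locates the single insertion index in one scan and splices the rows in with take/drop,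
-- instead of A's accumulator loop threading result/in_section/table_started/inserted state (objective: simpler).

-- ===== PORT A =====
-- state: (result, in_section, table_started, inserted); one step of A's for-loop
def aStep (new_rows : List String) (st : List String × Bool × Bool × Bool) (line : String) :
    List String × Bool × Bool × Bool :=
  let result := st.1; let in_section := st.2.1; let table_started := st.2.2.1; let inserted := st.2.2.2
  if PySem.Str.isIn "## ACTIVE POSITIONS" line then
    (result ++ [line], true, table_started, inserted)
  else if in_section && !inserted then
    let table_started :=
      if PySem.Str.startswith line "|" && !PySem.Str.isIn "---" line && !PySem.Str.isIn "Ticker" line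
      then true else table_started
    let ri : List String × Bool :=
      if table_started && !PySem.Str.startswith line "|" then (result ++ new_rows, true)
      else (result, inserted)
    let ris : List String × Bool × Bool :=
      if PySem.Str.startswith line "##" && !PySem.Str.startswith line "## ACTIVE" then
        (if !ri.2 then (ri.1 ++ new_rows, true, false) else (ri.1, ri.2, false))
      else (ri.1, ri.2, in_section)
    (ris.1 ++ [line], ris.2.2, table_started, ris.2.1)
  else
    (result ++ [line], in_section, table_started, inserted)

def update_active_positions (md : String) (new_rows : List String) : String :=
  let lines := PySem.Str.splitlines md
  let st := lines.foldl (aStep new_rows) ([], false, false, false)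
  let result := if !st.2.2.2 then st.1 ++ new_rows else st.1
  PySem.Str.join "\n" result

-- ===== PORT B =====
-- first insertion index relative to the remaining lines (none = run to the end), as in Source B's loop
def bFind (lines : List String) (in_section table_started : Bool) : Option Nat :=
  match lines with
  | [] => none
  | line :: rest =>
    if PySem.Str.isIn "## ACTIVE POSITIONS" line then
      (bFind rest true table_started).map (· + 1)
    else if in_section then
      let table_started :=
        if PySem.Str.startswith line "|" && !PySem.Str.isIn "---" line && !PySem.Str.isIn "Ticker" line
        then true else table_started
      if (table_started && !PySem.Str.startswith line "|") ||
         (PySem.Str.startswith line "##" && !PySem.Str.startswith line "## ACTIVE") then some 0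
      else (bFind rest in_section table_started).map (· + 1)
    else (bFind rest in_section table_started).map (· + 1)

def update_active_positions_alt (md : String) (new_rows : List String) : String :=
  let lines := PySem.Str.splitlines md
  let idx := (bFind lines false false).getD lines.length
  -- lines[:idx] / lines[idx:] with 0 ≤ idx ≤ len(lines) are exactly take/drop
  PySem.Str.join "\n" (lines.take idx ++ new_rows ++ lines.drop idx)

-- ===== PRECONDITION & SPEC =====
def Spec_update_active_positions (md : String) (new_rows : List String) (out : String) : Prop := out = update_active_positions_alt md new_rows
instance (md : String) (new_rows : List String) (out : String) : Decidable (Spec_update_active_positions md new_rows out) := by unfold Spec_update_active_positions; infer_instance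

-- ===== CLAIM (what is proved, stated in full; the proofs are below) =====
def Claim_equal_update_active_positions : Prop := ∀ (md : String) (new_rows : List String), Dom_update_active_positions md new_rows → Spec_update_active_positions md new_rows (update_active_positions md new_rows)

-- ===== LEMMAS AND PROOFS =====
-- the statement relating A's uninserted loop to B's splice, as a named predicate
def ASplice (nr lines acc : List String) (insec ts : Bool) : Prop :=
  (let st := lines.foldl (aStep nr) (acc, insec, ts, false)
   if !st.2.2.2 then st.1 ++ nr else st.1) =
  acc ++ lines.take ((bFind lines insec ts).getD lines.length) ++ nr ++
    lines.drop ((bFind lines insec ts).getD lines.length)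

-- once inserted, A's loop only appends the remaining lines
theorem aStep_inserted (nr : List String) :
    ∀ (lines acc : List String) (insec ts : Bool),
      ∃ insec' ts', lines.foldl (aStep nr) (acc, insec, ts, true) = (acc ++ lines, insec', ts', true) := by
  intro lines
  induction lines with
  | nil => intro acc insec ts; exact ⟨insec, ts, by simp⟩
  | cons l rest ih =>
    intro acc insec ts
    by_cases hh : PySem.Str.isIn "## ACTIVE POSITIONS" l = true
    · obtain ⟨i', t', he⟩ := ih (acc ++ [l]) true ts
      exact ⟨i', t', by simp only [List.foldl_cons, aStep, hh, if_true]; rw [he]; simp⟩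
    · obtain ⟨i', t', he⟩ := ih (acc ++ [l]) insec ts
      refine ⟨i', t', ?_⟩
      simp only [List.foldl_cons, aStep, hh, if_false, Bool.not_true, Bool.and_false,
        Bool.false_eq_true]
      rw [he]; simp

-- a step that neither inserts nor triggers advances both sides in lock-step
theorem skip_case (nr : List String) (l : String) (rest acc : List String) (insec ts : Bool)
    (h1 : (aStep nr (acc, insec, ts, false) l).1 = acc ++ [l])
    (h4 : (aStep nr (acc, insec, ts, false) l).2.2.2 = false)
    (hf : bFind (l :: rest) insec ts =
      (bFind rest (aStep nr (acc, insec, ts, false) l).2.1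
        (aStep nr (acc, insec, ts, false) l).2.2.1).map (· + 1))
    (ih : ∀ acc insec ts, ASplice nr rest acc insec ts) :
    ASplice nr (l :: rest) acc insec ts := by
  rcases hst : aStep nr (acc, insec, ts, false) l with ⟨a, b, c, d⟩
  rw [hst] at h1 h4 hf
  simp only at h1 h4 hf
  subst h1 h4
  unfold ASplice
  simp only [List.foldl_cons, hst, hf]
  have h := ih (acc ++ [l]) b c
  unfold ASplice at h
  cases hb : bFind rest b c with
  | none =>
    simp only [hb, Option.getD_none, Option.map_none] at h ⊢
    simp only [List.length_cons, List.take_succ_cons, List.take_length, List.drop_succ_cons,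
      List.drop_length] at h ⊢
    rw [h]; simp
  | some j =>
    simp only [hb, Option.getD_some, Option.map_some] at h ⊢
    simp only [List.take_succ_cons, List.drop_succ_cons] at h ⊢
    rw [h]; simp

-- a step on which A inserts the rows is exactly B's found index
theorem trig_case (nr : List String) (l : String) (rest acc : List String) (insec ts : Bool)
    (h1 : (aStep nr (acc, insec, ts, false) l).1 = acc ++ nr ++ [l])
    (h4 : (aStep nr (acc, insec, ts, false) l).2.2.2 = true)
    (hf : bFind (l :: rest) insec ts = some 0) :
    ASplice nr (l :: rest) acc insec ts := by
  rcases hst : aStep nr (acc, insec, ts, false) l with ⟨a, b, c, d⟩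
  rw [hst] at h1 h4
  simp only at h1 h4
  subst h1 h4
  unfold ASplice
  simp only [List.foldl_cons, hst, hf]
  obtain ⟨i', t', he⟩ := aStep_inserted nr rest (acc ++ nr ++ [l]) b c
  rw [he]
  simp

-- main invariant: A's uninserted loop produces the splice at B's index
theorem aLoop_eq_splice (nr : List String) :
    ∀ (lines acc : List String) (insec ts : Bool), ASplice nr lines acc insec ts := by
  intro lines
  induction lines with
  | nil => intro acc insec ts; unfold ASplice; simp [bFind]
  | cons l rest ih =>
    intro acc insec ts
    by_cases hh : PySem.Str.isIn "## ACTIVE POSITIONS" l = true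
    · exact skip_case nr l rest acc insec ts
        (by simp only [aStep, hh, if_true]) (by simp only [aStep, hh, if_true])
        (by simp only [bFind, hh, if_true, aStep]) ih
    · simp only [Bool.not_eq_true] at hh
      cases hi : insec with
      | false =>
        exact skip_case nr l rest acc false ts
          (by simp only [aStep, hh, Bool.false_eq_true, if_false, Bool.false_and])
          (by simp only [aStep, hh, Bool.false_eq_true, if_false, Bool.false_and])
          (by simp only [bFind, aStep, hh, Bool.false_eq_true, if_false, Bool.false_and]) ih
      | true =>
        cases hs1 : PySem.Str.startswith l "|" <;>
          cases hd : PySem.Str.isIn "---" l <;>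
          cases hti : PySem.Str.isIn "Ticker" l <;>
          cases hs2 : PySem.Str.startswith l "##" <;>
          cases hs3 : PySem.Str.startswith l "## ACTIVE" <;>
          cases ts <;>
          first
          | (refine trig_case nr l rest acc true _ ?_ ?_ ?_ <;>
              (simp only [aStep, bFind, hh, hs1, hd, hti, hs2, hs3, Bool.true_and,
                Bool.false_and, Bool.and_true, Bool.and_false, Bool.not_true, Bool.not_false,
                Bool.or_true, Bool.true_or, Bool.false_or, Bool.or_false, Bool.false_eq_true,
                reduceIte] <;> rfl))
          | (refine skip_case nr l rest acc true _ ?_ ?_ ?_ ih <;>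
              (simp only [aStep, bFind, hh, hs1, hd, hti, hs2, hs3, Bool.true_and,
                Bool.false_and, Bool.and_true, Bool.and_false, Bool.not_true, Bool.not_false,
                Bool.or_true, Bool.true_or, Bool.false_or, Bool.or_false, Bool.false_eq_true,
                reduceIte] <;> rfl))

-- ===== VERDICT (by name: the statement is the Claim_ definition above) =====
theorem update_active_positions_spec : Claim_equal_update_active_positions := by
  intro md nr _
  unfold Spec_update_active_positions update_active_positions update_active_positions_alt
  have h := aLoop_eq_splice nr (PySem.Str.splitlines md) [] false false
  unfold ASplice at h
  simp only at h ⊢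
  rw [h]
  simp [List.append_assoc]
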